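-- pv_equiv track=rewrite | github.com/nlindmark/AdventOfCode | Day7/Day7.py | part1
-- ===== SOURCE A (Python) =====
-- def remove(c, steps):
--     for s, dep in steps.items():
--         steps[s] = dep.replace(c,"")
--
--     return(steps)
--
-- def part1(steps, chrlst):
--     #First steps
--     order = ""
--     while(len(chrlst) > 0):
--         for c in chrlst:
--             if (not c in steps or len(steps[c]) == 0):
--                 # I can execute step c
--                 order += c
--                 steps = remove(c, steps)
--                 chrlst.remove(c)
--
--                 break
--     return(order)
-- ===== SOURCE B (Python) =====
-- import heapq
--
-- def part1(steps, chrlst):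
--     # Kahn-style greedy: a ready-min-heap keyed by original position replaces A's
--     # restart-from-the-front rescan, and only still-blocked steps are rewritten.
--     ready = []    # heap of (original index, step name) for steps whose deps are gone
--     blocked = []  # (original index, step name, remaining dep string), in index order
--     for i, c in enumerate(chrlst):
--         dep = steps.get(c)
--         if dep:
--             blocked.append((i, c, dep))
--         else:
--             heapq.heappush(ready, (i, c))
--     out = []
--     while ready:
--         i, c = heapq.heappop(ready)
--         out.append(c)
--         still = []
--         for j, d, dep in blocked:
--             dep = dep.replace(c, "")
--             if dep:
--                 still.append((j, d, dep))
--             else: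
--                 heapq.heappush(ready, (j, d))
--         blocked = still
--     return "".join(out)
-- ===== Notes on version B (the rewrite author's own statement) =====
-- stated objective: faster
-- what changed: B replaces A's restart-from-the-front rescan of chrlst and A's rewrite of every dict value after each executed step by a Kahn-style sweep: steps are classified once into a ready min-heap keyed by original position and a blocked list carrying their remaining dep strings; each pop touches only the still-blocked entries and pushes the newly freed ones.
import Mathlib
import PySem

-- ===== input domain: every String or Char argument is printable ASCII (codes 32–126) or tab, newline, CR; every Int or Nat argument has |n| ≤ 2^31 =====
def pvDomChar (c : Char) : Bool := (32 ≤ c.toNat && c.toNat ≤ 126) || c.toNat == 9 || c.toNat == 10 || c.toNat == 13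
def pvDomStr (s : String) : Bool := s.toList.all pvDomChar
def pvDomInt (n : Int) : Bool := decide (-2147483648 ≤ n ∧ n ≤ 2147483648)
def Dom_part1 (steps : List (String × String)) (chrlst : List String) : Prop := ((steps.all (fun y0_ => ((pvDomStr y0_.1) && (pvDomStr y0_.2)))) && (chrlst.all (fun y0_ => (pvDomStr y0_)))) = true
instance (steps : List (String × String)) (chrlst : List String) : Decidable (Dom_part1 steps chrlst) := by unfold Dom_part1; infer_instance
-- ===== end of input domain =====

-- B replaces A's restart-from-the-front rescans and whole-dict rewrites by a Kahn-style
-- ready-queue sweep (objective: faster, same return value).  Equivalence is about the RETURN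
-- value only: Python A empties `chrlst` and rewrites `steps` in place, B mutates nothing.
-- Python A's while-loop spins forever when some steps remain but none is ready; at exactly
-- that point both ports return the order accumulated so far (A's port runs on fuel
-- `chrlst.length`, which every terminating run stays within).

-- ===== PORT A =====
-- `c in steps` / `steps[c]` / `steps.get(c)`: first-match lookup in the association list (a Python dict).
def pvLookup (steps : List (String × String)) (c : String) : Option String :=
  (steps.find? (fun p => p.1 == c)).map (·.2)

-- Python `remove`: every stored dep becomes `dep.replace(c, "")`.
def pvRemove (c : String) (steps : List (String × String)) : List (String × String) :=
  steps.map (fun p => (p.1, PySem.Str.replace p.2 c ""))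

-- `not c in steps or len(steps[c]) == 0`
def pvReadyA (steps : List (String × String)) (c : String) : Bool :=
  match pvLookup steps c with
  | none => true
  | some d => d == ""

-- the while-loop; the inner `for … break` is the first ready element of `chrlst`
def part1Go : Nat → List (String × String) → List String → String → String
  | 0, _, _, order => order
  | n+1, steps, chrlst, order =>
    if chrlst.isEmpty then order
    else
      match chrlst.find? (fun c => pvReadyA steps c) with
      | some c => part1Go n (pvRemove c steps) (chrlst.erase c) (order ++ c)
      | none => order

def part1 (steps : List (String × String)) (chrlst : List String) : String :=
  part1Go chrlst.length steps chrlst ""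

-- ===== PORT B =====
-- `heapq.heappush` on distinct (index, name) keys, ported as insertion into the
-- index-sorted list: the sequence of heappops is identical.
def pvPush (h : List (Int × String)) (p : Int × String) : List (Int × String) :=
  match h with
  | [] => [p]
  | q :: t => if p.1 ≤ q.1 then p :: q :: t else q :: pvPush t p

-- body of B's `for j, d, dep in blocked` sweep after popping step `c`
def pvStep (c : String) (acc : List (Int × String) × List (Int × String × String))
    (q : Int × String × String) : List (Int × String) × List (Int × String × String) :=
  let dep := PySem.Str.replace q.2.2 c ""
  if dep == "" then (pvPush acc.1 (q.1, q.2.1), acc.2)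
  else (acc.1, acc.2 ++ [(q.1, q.2.1, dep)])

-- body of B's initial `for i, c in enumerate(chrlst)` classification
def pvClassify (steps : List (String × String))
    (acc : List (Int × String) × List (Int × String × String)) (p : Int × String) :
    List (Int × String) × List (Int × String × String) :=
  match pvLookup steps p.2 with
  | some d => if d == "" then (pvPush acc.1 p, acc.2) else (acc.1, acc.2 ++ [(p.1, p.2, d)])
  | none => (pvPush acc.1 p, acc.2)

theorem length_pvPush (h : List (Int × String)) (p : Int × String) :
    (pvPush h p).length = h.length + 1 := by
  induction h with
  | nil => rfl
  | cons q t ih => by_cases hle : p.1 ≤ q.1 <;> simp [pvPush, hle, ih]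

-- cited by altGo's decreasing_by: the sweep preserves (ready, blocked) total size
theorem length_pvStep_foldl (c : String) (L : List (Int × String × String))
    (r : List (Int × String)) (b : List (Int × String × String)) :
    (L.foldl (pvStep c) (r, b)).1.length + (L.foldl (pvStep c) (r, b)).2.length
      = r.length + b.length + L.length := by
  induction L generalizing r b with
  | nil => simp
  | cons q t ih =>
    simp only [List.foldl_cons, pvStep]
    by_cases hd : PySem.Str.replace q.2.2 c "" == ""
    · simp only [hd, if_pos]; rw [ih]; simp [length_pvPush]; omega
    · simp only [hd, if_neg, Bool.false_eq_true, not_false_iff]; rw [ih]; simp; omega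

-- B's while-loop: pop the least-index ready step, sweep the blocked list once
def altGo : List (Int × String) → List (Int × String × String) → List String → List String
  | [], _, out => out
  | (_, c) :: rest, blocked, out =>
    let st := blocked.foldl (pvStep c) (rest, [])
    altGo st.1 st.2 (out ++ [c])
termination_by ready blocked _ => ready.length + blocked.length
decreasing_by
  have := length_pvStep_foldl c blocked rest []
  simp_all

def part1_alt (steps : List (String × String)) (chrlst : List String) : String :=
  let init := (PySem.List.enumerate chrlst).foldl (pvClassify steps) ([], [])
  PySem.Str.join "" (altGo init.1 init.2 [])

-- ===== PRECONDITION & SPEC =====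
def Spec_part1 (steps : List (String × String)) (chrlst : List String) (out : String) : Prop := out = part1_alt steps chrlst
instance (steps : List (String × String)) (chrlst : List String) (out : String) : Decidable (Spec_part1 steps chrlst out) := by unfold Spec_part1; infer_instance

-- ===== CLAIM (what is proved, stated in full; the proofs are below) =====
def Claim_equal_part1 : Prop := ∀ (steps : List (String × String)) (chrlst : List String), Dom_part1 steps chrlst → Spec_part1 steps chrlst (part1 steps chrlst)

-- ===== LEMMAS AND PROOFS =====

-- the blocked entry a not-yet-ready step contributes (none ↔ the step is ready)
def pvBf (steps : List (String × String)) (p : Int × String) : Option (Int × String × String) :=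
  match pvLookup steps p.2 with
  | none => none
  | some d => if d == "" then none else some (p.1, p.2, d)

theorem pvBf_eq_none_iff (steps : List (String × String)) (p : Int × String) :
    pvBf steps p = none ↔ pvReadyA steps p.2 = true := by
  unfold pvBf pvReadyA
  cases h : pvLookup steps p.2 with
  | none => simp
  | some d => by_cases hd : d == "" <;> simp [hd]

theorem chars_join_nil (L : List (List Char)) : PySem.Chars.join [] L = L.flatten := by
  induction L with
  | nil => simp [PySem.Chars.join, List.intercalate]
  | cons a t ih =>
    cases t with
    | nil => simp [PySem.Chars.join, List.intercalate]
    | cons b t' =>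
      simp only [PySem.Chars.join, List.intercalate] at ih ⊢
      simp [List.intersperse_cons₂] at ih ⊢
      exact ih

theorem replace_empty (c : String) : PySem.Str.replace "" c "" = "" := by
  rw [← String.toList_inj, PySem.Str.toList_replace]
  by_cases hc : (c.toList).isEmpty
  · simp [PySem.Chars.replace, hc]
  · simp only [PySem.Chars.replace, hc, Bool.false_eq_true, if_false]
    simp [PySem.Chars.replace.go]

theorem join_empty : PySem.Str.join "" ([] : List String) = "" := by
  rw [← String.toList_inj, PySem.Str.toList_join]
  simp

theorem join_append_singleton (l : List String) (c : String) :
    PySem.Str.join "" (l ++ [c]) = PySem.Str.join "" l ++ c := by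
  rw [← String.toList_inj]
  simp [PySem.Str.toList_join, chars_join_nil]

theorem lookup_pvRemove (steps : List (String × String)) (c v : String) :
    pvLookup (pvRemove c steps) v = (pvLookup steps v).map (fun d => PySem.Str.replace d c "") := by
  unfold pvLookup pvRemove
  rw [List.find?_map]
  have : ((fun p : String × String => p.1 == v) ∘ fun p : String × String => (p.1, PySem.Str.replace p.2 c ""))
      = (fun p : String × String => p.1 == v) := rfl
  rw [this]
  cases steps.find? (fun p : String × String => p.1 == v); simp; simp

theorem ready_pvRemove_of_ready (steps : List (String × String)) (c v : String)
    (h : pvReadyA steps v = true) : pvReadyA (pvRemove c steps) v = true := by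
  unfold pvReadyA at h ⊢
  rw [lookup_pvRemove]
  cases hl : pvLookup steps v with
  | none => simp
  | some d =>
    rw [hl] at h
    simp only at h
    have hd : d = "" := by simpa using h
    subst hd
    simp [replace_empty]

theorem pvPush_cons_of_lt (r : List (Int × String)) (p : Int × String)
    (h : ∀ q ∈ r, p.1 < q.1) : pvPush r p = p :: r := by
  cases r with
  | nil => rfl
  | cons q t =>
    have : p.1 ≤ q.1 := le_of_lt (h q (by simp))
    simp [pvPush, this]

theorem pvPush_append_of_gt (r : List (Int × String)) (p : Int × String)
    (h : ∀ q ∈ r, q.1 < p.1) : pvPush r p = r ++ [p] := by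
  induction r with
  | nil => rfl
  | cons q t ih =>
    have h1 : ¬ p.1 ≤ q.1 := by
      have := h q (by simp)
      omega
    simp only [pvPush, h1, if_false]
    rw [ih (fun x hx => h x (by simp [hx]))]
    simp

theorem key_mem_filterMap_pvBf (steps : List (String × String)) (t : List (Int × String))
    (q : Int × String × String) (hq : q ∈ t.filterMap (pvBf steps)) :
    ∃ a ∈ t, q.1 = a.1 := by
  rcases List.mem_filterMap.mp hq with ⟨a, ha, hba⟩
  refine ⟨a, ha, ?_⟩
  unfold pvBf at hba
  cases hl : pvLookup steps a.2 with
  | none => rw [hl] at hba; simp at hba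
  | some d =>
    rw [hl] at hba
    by_cases hd : d == ""
    · simp [hd] at hba
    · simp [hd] at hba; simp [← hba]

theorem foldl_pvStep_cons (c : String) (L : List (Int × String × String))
    (hd : Int × String) (r : List (Int × String)) (b : List (Int × String × String))
    (h : ∀ q ∈ L, hd.1 < q.1) :
    L.foldl (pvStep c) (hd :: r, b) = ((L.foldl (pvStep c) (r, b)).1.cons hd, (L.foldl (pvStep c) (r, b)).2) := by
  induction L generalizing r b with
  | nil => simp
  | cons q t ih =>
    simp only [List.foldl_cons]
    have hq : hd.1 < q.1 := h q (by simp)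
    have ht : ∀ x ∈ t, hd.1 < x.1 := fun x hx => h x (by simp [hx])
    by_cases hdep : PySem.Str.replace q.2.2 c "" == ""
    · have hpush : pvPush (hd :: r) (q.1, q.2.1) = hd :: pvPush r (q.1, q.2.1) := by
        have : ¬ (q.1 ≤ hd.1) := by omega
        simp [pvPush, this]
      simp only [pvStep, hdep, if_pos, hpush]
      exact ih _ _ ht
    · simp only [pvStep, hdep, Bool.false_eq_true, if_false]
      exact ih _ _ ht

theorem foldl_pvStep_snd (c : String) (L : List (Int × String × String))
    (r : List (Int × String)) (b : List (Int × String × String)) :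
    L.foldl (pvStep c) (r, b) = ((L.foldl (pvStep c) (r, [])).1, b ++ (L.foldl (pvStep c) (r, [])).2) := by
  induction L generalizing r b with
  | nil => simp
  | cons q t ih =>
    simp only [List.foldl_cons]
    by_cases hdep : PySem.Str.replace q.2.2 c "" == ""
    · simp only [pvStep, hdep, if_pos]
      exact ih _ _
    · simp only [pvStep, hdep, Bool.false_eq_true, if_false]
      rw [ih _ (b ++ [(q.1, q.2.1, PySem.Str.replace q.2.2 c "")]),
          ih _ ([] ++ [(q.1, q.2.1, PySem.Str.replace q.2.2 c "")])]
      simp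

theorem sweep_eq (rem : List (Int × String)) (c : String) (steps : List (String × String))
    (hs : rem.Pairwise (fun a b => a.1 < b.1)) :
    (rem.filterMap (pvBf steps)).foldl (pvStep c) (rem.filter (fun p => pvReadyA steps p.2), [])
      = (rem.filter (fun p => pvReadyA (pvRemove c steps) p.2), rem.filterMap (pvBf (pvRemove c steps))) := by
  induction rem with
  | nil => simp
  | cons p t ih =>
    have hpt : ∀ q ∈ t, p.1 < q.1 := fun q hq => (List.pairwise_cons.mp hs).1 q hq
    have hst : t.Pairwise (fun a b => a.1 < b.1) := (List.pairwise_cons.mp hs).2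
    have hkeys : ∀ q ∈ t.filterMap (pvBf steps), p.1 < q.1 := by
      intro q hq
      rcases key_mem_filterMap_pvBf steps t q hq with ⟨a, ha, hqa⟩
      rw [hqa]; exact hpt a ha
    cases hbf : pvBf steps p with
    | none =>
      have hready : pvReadyA steps p.2 = true := (pvBf_eq_none_iff steps p).mp hbf
      have hready' : pvReadyA (pvRemove c steps) p.2 = true := ready_pvRemove_of_ready steps c p.2 hready
      have hbf' : pvBf (pvRemove c steps) p = none := (pvBf_eq_none_iff _ p).mpr hready'
      simp only [List.filterMap_cons, hbf, hbf', List.filter_cons, hready, hready', if_pos]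
      rw [foldl_pvStep_cons c _ p _ _ hkeys, ih hst]
    | some e =>
      -- p is blocked: pvBf gives (p.1, p.2, d) with lookup = some d, d ≠ ""
      have hlk : ∃ d, pvLookup steps p.2 = some d ∧ (d == "") = false ∧ e = (p.1, p.2, d) := by
        unfold pvBf at hbf
        cases hl : pvLookup steps p.2 with
        | none => rw [hl] at hbf; simp at hbf
        | some d =>
          rw [hl] at hbf
          by_cases hd : d == ""
          · simp [hd] at hbf
          · refine ⟨d, rfl, by simpa using hd, ?_⟩
            simp [hd] at hbf
            exact hbf.symm
      rcases hlk with ⟨d, hl, hd, he⟩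
      have hnotready : pvReadyA steps p.2 = false := by
        unfold pvReadyA; rw [hl]; simpa using hd
      have hl' : pvLookup (pvRemove c steps) p.2 = some (PySem.Str.replace d c "") := by
        rw [lookup_pvRemove, hl]; rfl
      subst he
      simp only [List.filterMap_cons, hbf, List.filter_cons, hnotready, Bool.false_eq_true, if_false,
        List.foldl_cons]
      by_cases hdc : PySem.Str.replace d c "" == ""
      · have hready' : pvReadyA (pvRemove c steps) p.2 = true := by
          unfold pvReadyA; rw [hl']; simpa using hdc
        have hbf' : pvBf (pvRemove c steps) p = none := (pvBf_eq_none_iff _ p).mpr hready'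
        have hpush : pvPush (t.filter (fun p => pvReadyA steps p.2)) (p.1, p.2) = (p.1, p.2) :: t.filter (fun p => pvReadyA steps p.2) := by
          apply pvPush_cons_of_lt
          intro q hq
          exact hpt q (List.mem_of_mem_filter hq)
        simp only [pvStep, hdc, if_pos, hpush]
        rw [foldl_pvStep_cons c _ (p.1, p.2) _ _ hkeys, ih hst]
        simp [hready', hbf']
      · have hready' : pvReadyA (pvRemove c steps) p.2 = false := by
          unfold pvReadyA; rw [hl']; simpa using hdc
        have hbf' : pvBf (pvRemove c steps) p = some (p.1, p.2, PySem.Str.replace d c "") := by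
          unfold pvBf; rw [hl']; simp [hdc]
        simp only [pvStep, hdc, Bool.false_eq_true, if_false]
        rw [foldl_pvStep_snd c _ _ ([] ++ [(p.1, p.2, PySem.Str.replace d c "")]), ih hst]
        simp [hready', hbf']

theorem classify_fold_aux (steps : List (String × String)) (l : List (Int × String)) :
    ∀ (r : List (Int × String)) (b : List (Int × String × String)),
    (∀ p ∈ l, ∀ q ∈ r, q.1 < p.1) → l.Pairwise (fun a b => a.1 < b.1) →
    l.foldl (pvClassify steps) (r, b)
      = (r ++ l.filter (fun p => pvReadyA steps p.2), b ++ l.filterMap (pvBf steps)) := by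
  induction l with
  | nil => simp
  | cons p t ih =>
    intro r b hlt hs
    have hpt : ∀ q ∈ t, p.1 < q.1 := fun q hq => (List.pairwise_cons.mp hs).1 q hq
    have hst : t.Pairwise (fun a b => a.1 < b.1) := (List.pairwise_cons.mp hs).2
    have hpr : ∀ q ∈ r, q.1 < p.1 := fun q hq => hlt p (by simp) q hq
    have hpush : pvPush r p = r ++ [p] := pvPush_append_of_gt r p hpr
    have hnext : ∀ x ∈ t, ∀ q ∈ r ++ [p], q.1 < x.1 := by
      intro x hx q hq
      rcases List.mem_append.mp hq with hq | hq
      · exact lt_trans (hpr q hq) (hpt x hx)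
      · simp at hq; rw [hq]; exact hpt x hx
    simp only [List.foldl_cons]
    cases hl : pvLookup steps p.2 with
    | none =>
      have hready : pvReadyA steps p.2 = true := by unfold pvReadyA; rw [hl]
      have hbf : pvBf steps p = none := (pvBf_eq_none_iff steps p).mpr hready
      simp only [pvClassify, hl, hpush]
      rw [ih (r ++ [p]) b (fun x hx => hnext x hx) hst]
      simp [hready, hbf]
    | some d =>
      by_cases hd : d == ""
      · have hready : pvReadyA steps p.2 = true := by unfold pvReadyA; rw [hl]; simpa using hd
        have hbf : pvBf steps p = none := (pvBf_eq_none_iff steps p).mpr hready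
        simp only [pvClassify, hl, hd, if_pos, hpush]
        rw [ih (r ++ [p]) b (fun x hx => hnext x hx) hst]
        simp [hready, hbf]
      · have hready : pvReadyA steps p.2 = false := by unfold pvReadyA; rw [hl]; simpa using hd
        have hbf : pvBf steps p = some (p.1, p.2, d) := by unfold pvBf; rw [hl]; simp [hd]
        simp only [pvClassify, hl, hd, Bool.false_eq_true, if_false]
        rw [ih r (b ++ [(p.1, p.2, d)]) (fun x hx q hq => hlt x (by simp [hx]) q hq) hst]
        simp [hready, hbf]

theorem classify_fold (steps : List (String × String)) (l : List (Int × String))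
    (hs : l.Pairwise (fun a b => a.1 < b.1)) :
    l.foldl (pvClassify steps) ([], [])
      = (l.filter (fun p => pvReadyA steps p.2), l.filterMap (pvBf steps)) := by
  simpa using classify_fold_aux steps l [] [] (by simp) hs

theorem altGo_eq (n : Nat) : ∀ (rem : List (Int × String)) (steps : List (String × String)) (out : List String),
    rem.Pairwise (fun a b => a.1 < b.1) → rem.length = n →
    PySem.Str.join "" (altGo (rem.filter (fun p => pvReadyA steps p.2)) (rem.filterMap (pvBf steps)) out)
      = part1Go n steps (rem.map (·.2)) (PySem.Str.join "" out) := by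
  induction n with
  | zero =>
    intro rem steps out _ hlen
    have : rem = [] := List.length_eq_zero_iff.mp hlen
    subst this
    simp [altGo, part1Go]
  | succ n ih =>
    intro rem steps out hs hlen
    have hne : rem ≠ [] := by intro h; subst h; simp at hlen
    have hmapne : (rem.map (·.2)).isEmpty = false := by
      cases rem with
      | nil => exact absurd rfl hne
      | cons a t => simp
    cases hfind : rem.find? (fun p => pvReadyA steps p.2) with
    | none =>
      have hfilter : rem.filter (fun p => pvReadyA steps p.2) = [] := by
        apply List.filter_eq_nil_iff.mpr
        intro a ha
        have := List.find?_eq_none.mp hfind a ha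
        simpa using this
      have hfindA : (rem.map (·.2)).find? (fun c => pvReadyA steps c) = none := by
        rw [List.find?_map]
        have : (rem.find? ((fun c => pvReadyA steps c) ∘ (·.2))) = none := hfind
        rw [this]
        rfl
      rw [hfilter]
      simp only [altGo]
      rw [part1Go]
      simp [hmapne, hfindA]
    | some x =>
      rcases List.find?_eq_some_iff_append.mp hfind with ⟨hx, as, bs, hrem, has⟩
      have hfindA : (rem.map (·.2)).find? (fun c => pvReadyA steps c) = some x.2 := by
        rw [List.find?_map]
        have : (rem.find? ((fun c => pvReadyA steps c) ∘ (·.2))) = some x := hfind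
        rw [this]
        rfl
      have hasf : ∀ a ∈ as, pvReadyA steps a.2 = false := by
        intro a ha
        have := has a ha
        simpa using this
      have hbfx : pvBf steps x = none := (pvBf_eq_none_iff steps x).mpr hx
      obtain ⟨xi, xc⟩ := x
      -- the remaining list after executing x
      have hsub : (as ++ bs).Sublist rem := by
        rw [hrem]; exact (List.sublist_cons_self (xi, xc) bs).append_left as
      have hs' : (as ++ bs).Pairwise (fun a b => a.1 < b.1) := hs.sublist hsub
      have hlen' : (as ++ bs).length = n := by
        rw [hrem] at hlen; simp at hlen ⊢; omega
      have hfilter : rem.filter (fun p => pvReadyA steps p.2)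
          = (xi, xc) :: bs.filter (fun p => pvReadyA steps p.2) := by
        rw [hrem, List.filter_append, List.filter_eq_nil_iff.mpr (by intro a ha; simp [hasf a ha]),
          List.filter_cons]
        simp [hx]
      have hfilter' : bs.filter (fun p => pvReadyA steps p.2)
          = (as ++ bs).filter (fun p => pvReadyA steps p.2) := by
        symm
        rw [List.filter_append, List.filter_eq_nil_iff.mpr (by intro a ha; simp [hasf a ha]),
          List.nil_append]
      have hfm : rem.filterMap (pvBf steps) = (as ++ bs).filterMap (pvBf steps) := by
        rw [hrem, List.filterMap_append, List.filterMap_append, List.filterMap_cons, hbfx]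
      have herase : (rem.map (·.2)).erase xc = (as ++ bs).map (·.2) := by
        have hnotmem : xc ∉ as.map (·.2) := by
          intro hmem
          rcases List.mem_map.mp hmem with ⟨a, ha, hav⟩
          have := hasf a ha
          rw [hav] at this
          rw [this] at hx
          exact Bool.false_ne_true hx
        rw [hrem]
        simp only [List.map_append, List.map_cons]
        rw [List.erase_append_right _ hnotmem, List.erase_cons_head]
      rw [hfilter, hfm, altGo]
      rw [hfilter', sweep_eq (as ++ bs) xc steps hs']
      rw [ih (as ++ bs) (pvRemove xc steps) (out ++ [xc]) (by
          -- pairwise is preserved: same list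
          exact hs') hlen']
      conv_rhs => rw [part1Go]
      rw [if_neg (by simp [hmapne]), hfindA]
      simp only [herase, join_append_singleton]


-- ===== VERDICT (by name: the statement is the Claim_ definition above) =====
theorem part1_spec : Claim_equal_part1 := by
  intro steps chrlst _
  unfold Spec_part1 part1 part1_alt
  have h := altGo_eq chrlst.length (PySem.List.enumerate chrlst) steps []
    (PySem.List.pairwise_lt_enumerate chrlst 0) (by simp [PySem.List.length_enumerate])
  rw [classify_fold steps _ (PySem.List.pairwise_lt_enumerate chrlst 0)]
  rw [h, PySem.List.map_snd_enumerate, join_empty]
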